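-- pv_equiv track=rewrite | github.com/zhuobinggang/honda | printer.py | ds_printer
-- ===== SOURCE A (Python) =====
-- def token_transfer_by_titles(tokens, titles, i, last, then):
--     last_is_title = titles[last] if last > -1 else False
--     next_is_title = titles[then] if then < len(tokens) else False
--     current_is_title = titles[i]
--     if current_is_title:
--         if not last_is_title: # 唯一需要特殊对待的情况
--             # False True 的情况，增加左标记
--             tokens[i] = '【' + tokens[i]
--         if not next_is_title:
--             # True False 的情况，增加右标记
--             tokens[i] = tokens[i] + '】'
--
-- def token_transfer_by_labels(tokens, ls, i, last, then, left_mark = '<u>', right_mark = '</u>'):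
--     last_is_emphasize = ls[last] if last > -1 else False
--     next_is_emphasize = ls[then] if then < len(tokens) else False
--     current_is_emphasize = ls[i]
--     if current_is_emphasize:
--         if not last_is_emphasize: # 唯一需要特殊对待的情况
--             # False True 的情况，增加左标记
--             tokens[i] = left_mark + tokens[i]
--         if not next_is_emphasize:
--             # True False 的情况，增加右标记
--             tokens[i] = tokens[i] + right_mark
--
-- def token_transfer_by_emphasizes(tokens, emphasizes, i, last, then):
--     last_is_emphasize = emphasizes[last] if last > -1 else False
--     next_is_emphasize = emphasizes[then] if then < len(tokens) else False
--     current_is_emphasize = emphasizes[i]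
--     if current_is_emphasize:
--         if not last_is_emphasize: # 唯一需要特殊对待的情况
--             # False True 的情况，增加左标记
--             tokens[i] = '<span style="background-color:rgba(255, 87, 51, 0.5);">' + tokens[i]
--         if not next_is_emphasize:
--             # True False 的情况，增加右标记
--             tokens[i] = tokens[i] + '</span>'
--
-- def print_sentence(item, emphasizes = None):
--     tokens, ls, titles, paras = item
--     tokens = tokens.copy()
--     for i in range(len(tokens)):
--         last = i - 1
--         then = i + 1
--         token_transfer_by_titles(tokens, titles, i, last, then)
--         token_transfer_by_labels(tokens, ls, i, last, then)
--         if emphasizes: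
--             token_transfer_by_emphasizes(tokens, emphasizes, i, last, then)
--     text = ''.join(tokens)
--     # 段落情报
--     if paras[0] == 1:
--         text = '□' + text
--     return text
--
-- def ds_printer(ds, LENGTH = None):
--     if not LENGTH:
--         LENGTH = len(ds)
--     texts = []
--     for i in range(LENGTH):
--         text = print_sentence(ds[i])
--         texts.append(text)
--     return texts
-- ===== SOURCE B (Python) =====
-- def _true_runs(flags, n):
--     """Maximal runs of truthy flags over indices [0, n): list of (start, end)."""
--     runs = []
--     start = None
--     for i in range(n):
--         if flags[i]:
--             if start is None:
--                 start = i
--         else: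
--             if start is not None:
--                 runs.append((start, i - 1))
--                 start = None
--     if start is not None:
--         runs.append((start, n - 1))
--     return runs
--
-- def _render(item):
--     tokens, ls, titles, paras = item
--     n = len(tokens)
--     pre = [''] * n
--     post = [''] * n
--     for s, e in _true_runs(titles, n):
--         pre[s] = '【'
--         post[e] = '】'
--     for s, e in _true_runs(ls, n):
--         pre[s] = '<u>' + pre[s]
--         post[e] = post[e] + '</u>'
--     text = ''.join(pre[i] + tokens[i] + post[i] for i in range(n))
--     if paras[0] == 1:
--         text = '□' + text
--     return text
--
-- def ds_printer(ds, LENGTH=None):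
--     if not LENGTH:
--         LENGTH = len(ds)
--     return [_render(ds[i]) for i in range(LENGTH)]
-- ===== Notes on version B (the rewrite author's own statement) =====
-- stated objective: alternative
-- what changed: Instead of A's per-token neighbor-checking mutation helpers, B first computes the maximal True-run intervals of titles and of ls, then splices open/close marks into pre/post mark tables indexed by run boundaries, and joins pre[i]+token+post[i].
import Mathlib
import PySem

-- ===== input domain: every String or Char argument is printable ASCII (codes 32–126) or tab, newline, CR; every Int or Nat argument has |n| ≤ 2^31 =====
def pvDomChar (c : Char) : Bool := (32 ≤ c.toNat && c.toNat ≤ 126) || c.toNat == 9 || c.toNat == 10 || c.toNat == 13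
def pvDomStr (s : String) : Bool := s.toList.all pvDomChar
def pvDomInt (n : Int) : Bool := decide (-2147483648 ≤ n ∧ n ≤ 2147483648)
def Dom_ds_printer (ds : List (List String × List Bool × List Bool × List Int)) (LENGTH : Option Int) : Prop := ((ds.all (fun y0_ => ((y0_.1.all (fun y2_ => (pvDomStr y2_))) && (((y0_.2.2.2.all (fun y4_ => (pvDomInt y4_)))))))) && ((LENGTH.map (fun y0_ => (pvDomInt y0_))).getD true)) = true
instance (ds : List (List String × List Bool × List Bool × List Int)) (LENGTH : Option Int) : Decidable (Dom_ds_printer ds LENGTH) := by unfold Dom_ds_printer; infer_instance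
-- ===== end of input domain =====

-- B replaces A's per-token neighbor-checking mutation helpers by a staged interval algorithm:
-- compute the maximal True-run intervals of titles and of ls, splice open/close marks into
-- pre/post mark tables at the run boundaries, then join pre[i]+token+post[i] (objective: alternative).

-- ===== PORT A =====
-- token_transfer_by_titles: reads last/next flags, prepends '【' / appends '】' at index i
def pvTitleStep (tokens : List String) (titles : List Bool) (i : Nat) : List String :=
  let last_is_title := if (i : Int) - 1 > -1 then titles.getD (i - 1) false else false
  let next_is_title := if i + 1 < tokens.length then titles.getD (i + 1) false else false
  let current_is_title := titles.getD i false
  if current_is_title then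
    let tokens1 := if !last_is_title then tokens.set i ("【" ++ tokens.getD i "") else tokens
    if !next_is_title then tokens1.set i (tokens1.getD i "" ++ "】") else tokens1
  else tokens

-- token_transfer_by_labels with the default marks '<u>' / '</u>'
def pvLabelStep (tokens : List String) (ls : List Bool) (i : Nat) : List String :=
  let last_is_emphasize := if (i : Int) - 1 > -1 then ls.getD (i - 1) false else false
  let next_is_emphasize := if i + 1 < tokens.length then ls.getD (i + 1) false else false
  let current_is_emphasize := ls.getD i false
  if current_is_emphasize then
    let tokens1 := if !last_is_emphasize then tokens.set i ("<u>" ++ tokens.getD i "") else tokens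
    if !next_is_emphasize then tokens1.set i (tokens1.getD i "" ++ "</u>") else tokens1
  else tokens

-- print_sentence (called with emphasizes = None, so the emphasize branch never runs)
def pvPrintSentence (item : List String × List Bool × List Bool × List Int) : String :=
  let tokens := item.1
  let ls := item.2.1
  let titles := item.2.2.1
  let paras := item.2.2.2
  let tokens' := (List.range tokens.length).foldl
    (fun tks i => pvLabelStep (pvTitleStep tks titles i) ls i) tokens
  let text := String.join tokens'
  if paras.getD 0 0 = 1 then "□" ++ text else text

def ds_printer (ds : List (List String × List Bool × List Bool × List Int)) (LENGTH : Option Int) : List String :=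
  let N : Int := match LENGTH with
    | none => (ds.length : Int)
    | some n => if n = 0 then (ds.length : Int) else n
  (PySem.List.pyRange 0 N 1).foldl
    (fun texts i => texts ++ [pvPrintSentence (ds.getD i.toNat ([], [], [], []))]) []

-- ===== PORT B =====
-- _true_runs's scan loop: state = (runs accumulated, start of the currently open run)
def pvRunsGo (flags : List Bool) (idxs : List Nat) (start : Option Nat) (acc : List (Nat × Nat)) :
    List (Nat × Nat) × Option Nat :=
  match idxs with
  | [] => (acc, start)
  | i :: rest =>
    if flags.getD i false then
      match start with
      | none => pvRunsGo flags rest (some i) acc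
      | some s => pvRunsGo flags rest (some s) acc
    else
      match start with
      | some s => pvRunsGo flags rest none (acc ++ [(s, i - 1)])
      | none => pvRunsGo flags rest none acc

-- _true_runs: maximal runs of True flags over [0, n), plus the final flush
def pvTrueRuns (flags : List Bool) (n : Nat) : List (Nat × Nat) :=
  let r := pvRunsGo flags (List.range n) none []
  match r.2 with
  | some s => r.1 ++ [(s, n - 1)]
  | none => r.1

-- _render: splice marks into pre/post tables at run boundaries, then join pre[i]+token[i]+post[i]
def pvRenderB (item : List String × List Bool × List Bool × List Int) : String :=
  let tokens := item.1
  let ls := item.2.1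
  let titles := item.2.2.1
  let paras := item.2.2.2
  let n := tokens.length
  let pp0 : List String × List String := (List.replicate n "", List.replicate n "")
  let pp1 := (pvTrueRuns titles n).foldl
    (fun pq se => (pq.1.set se.1 "【", pq.2.set se.2 "】")) pp0
  let pp2 := (pvTrueRuns ls n).foldl
    (fun pq se => (pq.1.set se.1 ("<u>" ++ pq.1.getD se.1 ""),
                   pq.2.set se.2 (pq.2.getD se.2 "" ++ "</u>"))) pp1
  let text := String.join ((List.range n).map
    (fun i => pp2.1.getD i "" ++ (tokens.getD i "" ++ pp2.2.getD i "")))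
  if paras.getD 0 0 = 1 then "□" ++ text else text

def ds_printer_alt (ds : List (List String × List Bool × List Bool × List Int)) (LENGTH : Option Int) : List String :=
  let N : Int := match LENGTH with
    | none => (ds.length : Int)
    | some n => if n = 0 then (ds.length : Int) else n
  (PySem.List.pyRange 0 N 1).map (fun i => pvRenderB (ds.getD i.toNat ([], [], [], [])))

-- ===== PRECONDITION & SPEC =====
-- Pre_ = exactly where Python A returns: the effective length fits in ds, and every
-- processed item has ls/titles at least as long as tokens and a nonempty paras
-- (otherwise A raises IndexError).
def pvItemOk (item : List String × List Bool × List Bool × List Int) : Prop :=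
  item.1.length ≤ item.2.1.length ∧ item.1.length ≤ item.2.2.1.length ∧ item.2.2.2 ≠ []

def Pre_ds_printer (ds : List (List String × List Bool × List Bool × List Int)) (LENGTH : Option Int) : Prop :=
  let N : Int := match LENGTH with
    | none => (ds.length : Int)
    | some n => if n = 0 then (ds.length : Int) else n
  N ≤ (ds.length : Int) ∧ ∀ item ∈ ds.take N.toNat, pvItemOk item
instance (ds : List (List String × List Bool × List Bool × List Int)) (LENGTH : Option Int) : Decidable (Pre_ds_printer ds LENGTH) := by
  unfold Pre_ds_printer pvItemOk; infer_instance

def pvWitness_ds_printer : (List (List String × List Bool × List Bool × List Int)) × Option Int :=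
  ([(["a", "b"], [false, true], [true, true], [1]), (["c"], [true], [false], [0])], none)

def Spec_ds_printer (ds : List (List String × List Bool × List Bool × List Int)) (LENGTH : Option Int) (out : List String) : Prop := out = ds_printer_alt ds LENGTH
instance (ds : List (List String × List Bool × List Bool × List Int)) (LENGTH : Option Int) (out : List String) : Decidable (Spec_ds_printer ds LENGTH out) := by unfold Spec_ds_printer; infer_instance

-- ===== CLAIM (what is proved, stated in full; the proofs are below) =====
def Claim_equal_ds_printer : Prop := ∀ (ds : List (List String × List Bool × List Bool × List Int)) (LENGTH : Option Int), Dom_ds_printer ds LENGTH → Pre_ds_printer ds LENGTH → Spec_ds_printer ds LENGTH (ds_printer ds LENGTH)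

-- ===== LEMMAS AND PROOFS =====

-- the decoration A gives token i (label mark outside title mark)
def pvDec (titles ls : List Bool) (n i : Nat) (tok : String) : String :=
  (if (ls.getD i false) && !(if (i : Int) - 1 > -1 then ls.getD (i - 1) false else false) then "<u>" else "") ++
  ((if (titles.getD i false) && !(if (i : Int) - 1 > -1 then titles.getD (i - 1) false else false) then "【" else "") ++
  (tok ++
  ((if (titles.getD i false) && !(if i + 1 < n then titles.getD (i + 1) false else false) then "】" else "") ++
  (if (ls.getD i false) && !(if i + 1 < n then ls.getD (i + 1) false else false) then "</u>" else ""))))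

def pvDecList (titles ls : List Bool) (n : Nat) : List String → Nat → List String
  | [], _ => []
  | tok :: rest, i => pvDec titles ls n i tok :: pvDecList titles ls n rest (i + 1)

theorem pvTitleStep_length (tks : List String) (titles : List Bool) (i : Nat) :
    (pvTitleStep tks titles i).length = tks.length := by
  unfold pvTitleStep; split_ifs <;> simp_all <;> split_ifs <;> simp_all

theorem pvStep_length (tks : List String) (titles ls : List Bool) (i : Nat) :
    (pvLabelStep (pvTitleStep tks titles i) ls i).length = tks.length := by
  unfold pvLabelStep
  split_ifs <;> simp_all [pvTitleStep_length] <;> split_ifs <;> simp_all [pvTitleStep_length]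

theorem pvTitleStep_getD (tks : List String) (titles : List Bool) (i j : Nat) (hi : i < tks.length) :
    (pvTitleStep tks titles i).getD j "" =
      if j = i then
        (if (titles.getD i false) && !(if (i : Int) - 1 > -1 then titles.getD (i - 1) false else false) then "【" else "") ++
        (tks.getD i "" ++
        (if (titles.getD i false) && !(if i + 1 < tks.length then titles.getD (i + 1) false else false) then "】" else ""))
      else tks.getD j "" := by
  unfold pvTitleStep
  by_cases hji : j = i
  · subst hji
    split_ifs <;>
      simp_all [List.getD, List.getElem?_set, String.append_assoc] <;>
      split_ifs <;> simp_all [List.getD, List.getElem?_set, String.append_assoc]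
  · split_ifs <;>
      simp_all [List.getD, List.getElem?_set, Ne.symm hji] <;>
      split_ifs <;> simp_all [List.getD, List.getElem?_set, Ne.symm hji]

theorem pvLabelStep_getD (tks : List String) (ls : List Bool) (i j : Nat) (hi : i < tks.length) :
    (pvLabelStep tks ls i).getD j "" =
      if j = i then
        (if (ls.getD i false) && !(if (i : Int) - 1 > -1 then ls.getD (i - 1) false else false) then "<u>" else "") ++
        (tks.getD i "" ++
        (if (ls.getD i false) && !(if i + 1 < tks.length then ls.getD (i + 1) false else false) then "</u>" else ""))
      else tks.getD j "" := by
  unfold pvLabelStep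
  by_cases hji : j = i
  · subst hji
    split_ifs <;>
      simp_all [List.getD, List.getElem?_set, String.append_assoc] <;>
      split_ifs <;> simp_all [List.getD, List.getElem?_set, String.append_assoc]
  · split_ifs <;>
      simp_all [List.getD, List.getElem?_set, Ne.symm hji] <;>
      split_ifs <;> simp_all [List.getD, List.getElem?_set, Ne.symm hji]

theorem pvStep_getD (tks : List String) (titles ls : List Bool) (i j : Nat) (hi : i < tks.length) :
    (pvLabelStep (pvTitleStep tks titles i) ls i).getD j "" =
      if j = i then pvDec titles ls tks.length i (tks.getD i "") else tks.getD j "" := by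
  rw [pvLabelStep_getD _ _ _ _ (by rw [pvTitleStep_length]; exact hi)]
  rw [pvTitleStep_length, pvTitleStep_getD _ _ _ _ hi]
  by_cases hji : j = i
  · subst hji
    simp [pvDec, String.append_assoc]
  · rw [if_neg hji, if_neg hji, List.getD_eq_getElem?_getD, List.getD_eq_getElem?_getD,
      ← List.getD_eq_getElem?_getD, ← List.getD_eq_getElem?_getD,
      pvTitleStep_getD _ _ _ _ hi, if_neg hji]

theorem pvFold_getD (tokens : List String) (titles ls : List Bool) (m : Nat) (hm : m ≤ tokens.length) :
    ((List.range m).foldl (fun tks i => pvLabelStep (pvTitleStep tks titles i) ls i) tokens).length = tokens.length ∧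
    ∀ j, ((List.range m).foldl (fun tks i => pvLabelStep (pvTitleStep tks titles i) ls i) tokens).getD j "" =
      if j < m then pvDec titles ls tokens.length j (tokens.getD j "") else tokens.getD j "" := by
  induction m with
  | zero => simp
  | succ m ih =>
    obtain ⟨ihlen, ihget⟩ := ih (Nat.le_of_succ_le hm)
    rw [List.range_succ, List.foldl_append]
    refine ⟨by rw [List.foldl_cons, List.foldl_nil, pvStep_length, ihlen], ?_⟩
    intro j
    rw [List.foldl_cons, List.foldl_nil,
      pvStep_getD _ _ _ _ _ (by rw [ihlen]; omega), ihlen, ihget, ihget]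
    by_cases hjm : j = m
    · subst hjm; simp [Nat.lt_irrefl]
    · by_cases hlt : j < m <;> simp [hjm, hlt] <;> omega

theorem pvDecList_length (titles ls : List Bool) (n : Nat) (toks : List String) (i : Nat) :
    (pvDecList titles ls n toks i).length = toks.length := by
  induction toks generalizing i with
  | nil => rfl
  | cons tok rest ih => simp [pvDecList, ih]

theorem pvDecList_getD (titles ls : List Bool) (n : Nat) (toks : List String) (i j : Nat) :
    (pvDecList titles ls n toks i).getD j "" =
      if j < toks.length then pvDec titles ls n (i + j) (toks.getD j "") else "" := by
  induction toks generalizing i j with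
  | nil => simp [pvDecList]
  | cons tok rest ih =>
    cases j with
    | zero => simp [pvDecList]
    | succ j =>
      simp only [pvDecList, List.getD_cons_succ, ih]
      have : i + (j + 1) = (i + 1) + j := by omega
      simp [this, Nat.succ_lt_succ_iff]

theorem pvFold_eq_decList (tokens : List String) (titles ls : List Bool) :
    (List.range tokens.length).foldl (fun tks i => pvLabelStep (pvTitleStep tks titles i) ls i) tokens =
      pvDecList titles ls tokens.length tokens 0 := by
  obtain ⟨hlen, hget⟩ := pvFold_getD tokens titles ls tokens.length (le_refl _)
  apply List.ext_getElem (by rw [hlen, pvDecList_length])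
  intro j h1 h2
  have e1 : _ = _ := hget j
  have e2 : _ = _ := pvDecList_getD titles ls tokens.length tokens 0 j
  rw [List.getD_eq_getElem?_getD, List.getElem?_eq_getElem h1] at e1
  rw [List.getD_eq_getElem?_getD, List.getElem?_eq_getElem h2] at e2
  have hj : j < tokens.length := by rw [hlen] at h1; exact h1
  simp only [Option.getD_some] at e1 e2
  rw [e1, e2, if_pos hj, if_pos hj, Nat.zero_add]

-- ===== B-side characterisation: run boundaries =====

def pvIsStart (f : List Bool) (i : Nat) : Bool := f.getD i false && (i == 0 || !f.getD (i - 1) false)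
def pvIsEnd (f : List Bool) (n i : Nat) : Bool := f.getD i false && (i + 1 == n || !f.getD (i + 1) false)

def pvFlush (n : Nat) : Option Nat → List (Nat × Nat)
  | some s => [(s, n - 1)]
  | none => []

theorem pvRunsGo_spec (flags : List Bool) (n : Nat) :
    ∀ (k j : Nat) (start : Option Nat) (acc : List (Nat × Nat)), j + k = n →
    start.isSome = (decide (0 < j) && flags.getD (j - 1) false) →
    ((pvRunsGo flags (List.range' j k) start acc).1.map Prod.fst
        ++ (pvRunsGo flags (List.range' j k) start acc).2.toList
      = acc.map Prod.fst ++ start.toList ++ (List.range' j k).filter (pvIsStart flags)) ∧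
    (((pvRunsGo flags (List.range' j k) start acc).1
        ++ pvFlush n (pvRunsGo flags (List.range' j k) start acc).2).map Prod.snd
      = acc.map Prod.snd
        ++ (if start.isSome && (j == n || !flags.getD j false) then [j - 1] else [])
        ++ (List.range' j k).filter (pvIsEnd flags n)) := by
  intro k
  induction k with
  | zero =>
    intro j start acc hjk hs
    have hj : j = n := by omega
    subst hj
    cases start with
    | none => simp [pvRunsGo, pvFlush]
    | some s => simp [pvRunsGo, pvFlush]
  | succ k ih =>
    intro j start acc hjk hs
    rw [List.range'_succ]
    have hj1 : (j + 1) - 1 = j := by omega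
    rw [List.getD_eq_getElem?_getD] at hs
    by_cases hf : flags[j]?.getD false = true
    · have hend : pvIsEnd flags n j = (j + 1 == n || !flags[j+1]?.getD false) := by
        simp [pvIsEnd, hf]
      have hjn : (j == n) = false := by simp; omega
      cases start with
      | none =>
        have hstart' : (some j).isSome = (decide (0 < (j+1)) && flags.getD ((j+1) - 1) false) := by
          rw [hj1, List.getD_eq_getElem?_getD, hf]; simp
        have hns : flags[j-1]?.getD false = false ∨ j = 0 := by
          cases hgl : flags[j-1]?.getD false
          · exact Or.inl rfl
          · rcases Nat.eq_zero_or_pos j with h0 | h0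
            · exact Or.inr h0
            · rw [hgl] at hs; simp [h0] at hs
        have hst : pvIsStart flags j = true := by
          rcases hns with h | h
          · simp [pvIsStart, hf, h]
          · subst h; simp [pvIsStart, hf]
        simp only [pvRunsGo, List.getD_eq_getElem?_getD, hf, if_pos rfl, if_true]
        obtain ⟨ihf, ihs⟩ := ih (j+1) (some j) acc (by omega) hstart'
        constructor
        · rw [ihf, List.filter_cons, hst]
          simp
        · rw [ihs, List.filter_cons, hend]
          by_cases hc : (j + 1 == n || !flags[j+1]?.getD false) = true
          · simp [hc, hj1]
          · simp [hc, hj1]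
      | some s =>
        have hstart2 : (some s).isSome = (decide (0 < (j+1)) && flags.getD ((j+1) - 1) false) := by
          rw [hj1, List.getD_eq_getElem?_getD, hf]; simp
        have h2 : flags[j-1]?.getD false = true := by
          cases hgl : flags[j-1]?.getD false
          · rw [hgl] at hs; simp at hs
          · rfl
        have h1 : 0 < j := by
          rcases Nat.eq_zero_or_pos j with h0 | h0
          · rw [h0] at hs; simp at hs
          · exact h0
        have hst : pvIsStart flags j = false := by
          simp [pvIsStart, hf, h2]; omega
        simp only [pvRunsGo, List.getD_eq_getElem?_getD, hf, if_pos rfl, if_true]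
        obtain ⟨ihf, ihs⟩ := ih (j+1) (some s) acc (by omega) hstart2
        constructor
        · rw [ihf, List.filter_cons, hst]
          simp
        · rw [ihs, List.filter_cons, hend]
          by_cases hc : (j + 1 == n || !flags[j+1]?.getD false) = true
          · simp [hc, hj1, hjn, hf]
          · simp [hc, hj1, hjn, hf]
    · have hf' : flags[j]?.getD false = false := by simpa using hf
      have hstart' : (none : Option Nat).isSome = (decide (0 < (j+1)) && flags.getD ((j+1) - 1) false) := by
        rw [hj1, List.getD_eq_getElem?_getD, hf']; simp
      have hst : pvIsStart flags j = false := by simp [pvIsStart, hf']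
      have hend : pvIsEnd flags n j = false := by simp [pvIsEnd, hf']
      cases start with
      | none =>
        simp only [pvRunsGo, List.getD_eq_getElem?_getD, hf', Bool.false_eq_true, if_false]
        obtain ⟨ihf, ihs⟩ := ih (j+1) none acc (by omega) hstart'
        constructor
        · rw [ihf, List.filter_cons, hst]; simp
        · rw [ihs, List.filter_cons, hend]; simp
      | some s =>
        simp only [pvRunsGo, List.getD_eq_getElem?_getD, hf', Bool.false_eq_true, if_false]
        obtain ⟨ihf, ihs⟩ := ih (j+1) none (acc ++ [(s, j-1)]) (by omega) hstart'
        constructor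
        · rw [ihf, List.filter_cons, hst]; simp
        · rw [ihs, List.filter_cons, hend]; simp [hf']

theorem pvTrueRuns_fst (flags : List Bool) (n : Nat) :
    (pvTrueRuns flags n).map Prod.fst = (List.range n).filter (pvIsStart flags) := by
  have h := pvRunsGo_spec flags n n 0 none [] (by omega) (by simp)
  unfold pvTrueRuns
  rw [List.range_eq_range']
  cases hr : (pvRunsGo flags (List.range' 0 n) none []).2 with
  | none => simpa [hr] using h.1
  | some s =>
    have := h.1
    rw [hr] at this
    simpa [hr] using this
theorem pvTrueRuns_snd (flags : List Bool) (n : Nat) :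
    (pvTrueRuns flags n).map Prod.snd = (List.range n).filter (pvIsEnd flags n) := by
  have h := pvRunsGo_spec flags n n 0 none [] (by omega) (by simp)
  unfold pvTrueRuns
  rw [List.range_eq_range']
  cases hr : (pvRunsGo flags (List.range' 0 n) none []).2 with
  | none =>
    have := h.2
    rw [hr] at this
    simpa [hr, pvFlush] using this
  | some s =>
    have := h.2
    rw [hr] at this
    simpa [hr, pvFlush] using this

-- componentwise updates over a pair list decouple into two independent folds
theorem pvFoldlPair1 (l : List (Nat × Nat)) (a b : List String) :
    l.foldl (fun pq se => (pq.1.set se.1 "【", pq.2.set se.2 "】")) (a, b)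
      = ((l.map Prod.fst).foldl (fun t s => t.set s "【") a,
         (l.map Prod.snd).foldl (fun t s => t.set s "】") b) := by
  induction l generalizing a b with
  | nil => rfl
  | cons x xs ih => simp only [List.foldl_cons, List.map_cons]; exact ih _ _

theorem pvFoldlPair2 (l : List (Nat × Nat)) (a b : List String) :
    l.foldl (fun pq se => (pq.1.set se.1 ("<u>" ++ pq.1.getD se.1 ""),
                           pq.2.set se.2 (pq.2.getD se.2 "" ++ "</u>"))) (a, b)
      = ((l.map Prod.fst).foldl (fun t s => t.set s ("<u>" ++ t.getD s "")) a,
         (l.map Prod.snd).foldl (fun t s => t.set s (t.getD s "" ++ "</u>")) b) := by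
  induction l generalizing a b with
  | nil => rfl
  | cons x xs ih => simp only [List.foldl_cons, List.map_cons]; exact ih _ _

-- folding constant-value set over an index list
theorem pvFoldlSetConst (idxs : List Nat) (v : String) (a : List String) :
    ((idxs.foldl (fun t s => t.set s v) a).length = a.length) ∧
    ∀ i, (idxs.foldl (fun t s => t.set s v) a).getD i ""
      = if i ∈ idxs ∧ i < a.length then v else a.getD i "" := by
  induction idxs generalizing a with
  | nil => simp
  | cons s rest ih =>
    obtain ⟨ihl, ihg⟩ := ih (a.set s v)
    rw [List.foldl_cons]
    refine ⟨by rw [ihl]; simp, ?_⟩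
    intro i
    rw [ihg i]
    by_cases hm : i ∈ rest ∧ i < a.length
    · simp [hm, hm.1, hm.2]
    · rw [if_neg (by simpa using hm)]
      by_cases his : i = s
      · subst his
        by_cases hl : i < a.length
        · simp [List.getD, List.getElem?_set, hl]
        · rw [if_neg (by intro h; exact hl h.2)]
          simp [List.getD, List.getElem?_set, hl]
      · rw [if_neg (by intro h; rcases List.mem_cons.mp h.1 with h1 | h1; exact his h1; exact hm ⟨h1, h.2⟩)]
        simp [List.getD, List.getElem?_set, Ne.symm his]

-- folding a read-modify set over a duplicate-free index list
theorem pvFoldlSetMod (F : String → String) (idxs : List Nat) (hnd : idxs.Nodup) (a : List String) :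
    ((idxs.foldl (fun t s => t.set s (F (t.getD s ""))) a).length = a.length) ∧
    ∀ i, (idxs.foldl (fun t s => t.set s (F (t.getD s ""))) a).getD i ""
      = if i ∈ idxs ∧ i < a.length then F (a.getD i "") else a.getD i "" := by
  induction idxs generalizing a with
  | nil => simp
  | cons s rest ih =>
    obtain ⟨hns, hrest⟩ := List.nodup_cons.mp hnd
    obtain ⟨ihl, ihg⟩ := ih hrest (a.set s (F (a.getD s "")))
    rw [List.foldl_cons]
    refine ⟨by rw [ihl]; simp, ?_⟩
    intro i
    rw [ihg i]
    by_cases hm : i ∈ rest ∧ i < a.length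
    · have his : i ≠ s := fun h => hns (h ▸ hm.1)
      rw [if_pos (by simpa using hm)]
      rw [if_pos (by exact ⟨List.mem_cons_of_mem _ hm.1, hm.2⟩)]
      congr 1
      simp [List.getD, List.getElem?_set, Ne.symm his]
    · rw [if_neg (by simpa using hm)]
      by_cases his : i = s
      · subst his
        by_cases hl : i < a.length
        · rw [if_pos ⟨List.mem_cons_self, hl⟩]
          simp [List.getD, List.getElem?_set, hl]
        · rw [if_neg (by intro h; exact hl h.2)]
          simp [List.getD, List.getElem?_set, hl]
      · rw [if_neg (by intro h; rcases List.mem_cons.mp h.1 with h1 | h1; exact his h1; exact hm ⟨h1, h.2⟩)]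
        simp [List.getD, List.getElem?_set, Ne.symm his]

theorem pvStartsNodup (flags : List Bool) (n : Nat) : ((List.range n).filter (pvIsStart flags)).Nodup :=
  (List.nodup_range).filter _
theorem pvEndsNodup (flags : List Bool) (n : Nat) : ((List.range n).filter (pvIsEnd flags n)).Nodup :=
  (List.nodup_range).filter _

theorem pvMemFilterRange (p : Nat → Bool) (n i : Nat) :
    (i ∈ (List.range n).filter p) ↔ (i < n ∧ p i = true) := by
  simp [List.mem_filter, List.mem_range, and_comm]

-- the two mark tables, as built by B
def pvTables (ls titles : List Bool) (n : Nat) : List String × List String :=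
  (pvTrueRuns ls n).foldl
    (fun pq se => (pq.1.set se.1 ("<u>" ++ pq.1.getD se.1 ""),
                   pq.2.set se.2 (pq.2.getD se.2 "" ++ "</u>")))
    ((pvTrueRuns titles n).foldl (fun pq se => (pq.1.set se.1 "【", pq.2.set se.2 "】"))
      (List.replicate n "", List.replicate n ""))

-- the pre/post tables agree with A's per-token decoration
set_option maxHeartbeats 1600000 in
theorem pvTables_spec (tokens : List String) (ls titles : List Bool) :
    (List.range tokens.length).map (fun i =>
      (pvTables ls titles tokens.length).1.getD i "" ++
      (tokens.getD i "" ++ (pvTables ls titles tokens.length).2.getD i ""))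
    = pvDecList titles ls tokens.length tokens 0 := by
  unfold pvTables
  rw [pvFoldlPair1, pvFoldlPair2, pvTrueRuns_fst, pvTrueRuns_snd, pvTrueRuns_fst, pvTrueRuns_snd]
  set n := tokens.length with hn
  obtain ⟨hl1p, hg1p⟩ := pvFoldlSetConst ((List.range n).filter (pvIsStart titles)) "【" (List.replicate n "")
  obtain ⟨hl1q, hg1q⟩ := pvFoldlSetConst ((List.range n).filter (pvIsEnd titles n)) "】" (List.replicate n "")
  obtain ⟨hl2p, hg2p⟩ := pvFoldlSetMod (fun x => "<u>" ++ x) ((List.range n).filter (pvIsStart ls)) (pvStartsNodup ls n)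
    (((List.range n).filter (pvIsStart titles)).foldl (fun t s => t.set s "【") (List.replicate n ""))
  obtain ⟨hl2q, hg2q⟩ := pvFoldlSetMod (fun x => x ++ "</u>") ((List.range n).filter (pvIsEnd ls n)) (pvEndsNodup ls n)
    (((List.range n).filter (pvIsEnd titles n)).foldl (fun t s => t.set s "】") (List.replicate n ""))
  apply List.ext_getElem
  · simp [pvDecList_length, hn]
  · intro i h1 h2
    have hi : i < n := by simpa using h1
    have e2 : _ = _ := pvDecList_getD titles ls n tokens 0 i
    rw [List.getD_eq_getElem?_getD, List.getElem?_eq_getElem h2, Option.getD_some] at e2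
    rw [e2, if_pos hi, Nat.zero_add]
    have egp := hg2p i
    rw [hg1p i, hl1p] at egp
    have egq := hg2q i
    rw [hg1q i, hl1q] at egq
    simp only [List.getElem_map, List.getElem_range]
    rw [egp, egq]
    simp only [List.length_replicate, List.getD_replicate,
      pvMemFilterRange, hi, true_and, and_true]
    unfold pvDec pvIsStart pvIsEnd
    have hip : ((i : Int) - 1 > -1) ↔ (0 < i) := by omega
    have hin : (i + 1 < n) ↔ ¬(i + 1 = n) := by omega
    by_cases h0 : i = 0
    · subst h0
      simp [hin]
      by_cases hc1 : (1 = n) <;> by_cases hc2 : ls[0]?.getD false = true <;>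
        by_cases hc3 : titles[0]?.getD false = true <;> by_cases hc4 : ls[1]?.getD false = true <;>
        by_cases hc5 : titles[1]?.getD false = true <;>
        simp [hc1, hc2, hc3, hc4, hc5, String.append_assoc] <;>
        (try simp only [← String.append_assoc]) <;> (try rfl)
    · have h0' : (0 < i) := by omega
      simp [hip, h0', h0, hin]
      by_cases hc1 : (i + 1 = n) <;> by_cases hc2 : ls[i]?.getD false = true <;>
        by_cases hc3 : titles[i]?.getD false = true <;> by_cases hc4 : ls[i+1]?.getD false = true <;>
        by_cases hc5 : titles[i+1]?.getD false = true <;> by_cases hc6 : ls[i-1]?.getD false = true <;>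
        by_cases hc7 : titles[i-1]?.getD false = true <;>
        simp [hc1, hc2, hc3, hc4, hc5, hc6, hc7, String.append_assoc] <;>
        (try simp only [← String.append_assoc]) <;> (try rfl)

theorem pvRenderB_eq (item : List String × List Bool × List Bool × List Int) :
    pvRenderB item = pvPrintSentence item := by
  obtain ⟨tokens, ls, titles, paras⟩ := item
  have key := pvTables_spec tokens ls titles
  unfold pvTables at key
  unfold pvRenderB pvPrintSentence
  simp only [pvFold_eq_decList]
  rw [key]

theorem pvFoldAppend_eq_map {α β : Type} (l : List α) (f : α → β) (acc : List β) :
    l.foldl (fun texts i => texts ++ [f i]) acc = acc ++ l.map f := by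
  induction l generalizing acc with
  | nil => simp
  | cons x xs ih => simp [ih]


-- ===== VERDICT (by name: the statement is the Claim_ definition above) =====
theorem ds_printer_spec : Claim_equal_ds_printer := by
  intro ds LENGTH _dom _pre
  unfold Spec_ds_printer ds_printer ds_printer_alt
  rw [pvFoldAppend_eq_map]
  simp [pvRenderB_eq]
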